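-- pv_equiv track=rewrite | github.com/zhiyingf/pythonMooc | MOD_03/MOD_03_dictSet.py | englishCounter
-- ===== SOURCE A (Python) =====
-- def englishCounter(sr):
--     poemList=sr.split()
--     pDict={}
--     for item in poemList:
--         if item[-1] in ',.!?\'"':
--             item=item[:-1]
--         '''
--         if item not in pDict:
--             pDict[item]=1
--         else:
--             pDict[item]+=1
--         '''
--         pDict[item]=pDict.get(item,0)+1
--     return pDict
-- ===== SOURCE B (Python) =====
-- def englishCounter(sr):
--     words = []
--     for w in sr.split():
--         if w[-1] in ',.!?\'"':
--             w = w[:-1]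
--         words.append(w)
--     result = {}
--     rest = words
--     while rest:
--         first = rest[0]
--         smaller = [x for x in rest[1:] if x != first]
--         result[first] = len(rest) - len(smaller)
--         rest = smaller
--     return result
-- ===== Notes on version B (the rewrite author's own statement) =====
-- stated objective: alternative
-- what changed: A tallies words with a hash-dict get-and-increment in one pass; B repeatedly partitions the stripped word list: it takes the first remaining word, filters out all its occurrences, and records the count as the drop in list length, iterating until the list is empty (no per-word dict lookups or increments).
import Mathlib
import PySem

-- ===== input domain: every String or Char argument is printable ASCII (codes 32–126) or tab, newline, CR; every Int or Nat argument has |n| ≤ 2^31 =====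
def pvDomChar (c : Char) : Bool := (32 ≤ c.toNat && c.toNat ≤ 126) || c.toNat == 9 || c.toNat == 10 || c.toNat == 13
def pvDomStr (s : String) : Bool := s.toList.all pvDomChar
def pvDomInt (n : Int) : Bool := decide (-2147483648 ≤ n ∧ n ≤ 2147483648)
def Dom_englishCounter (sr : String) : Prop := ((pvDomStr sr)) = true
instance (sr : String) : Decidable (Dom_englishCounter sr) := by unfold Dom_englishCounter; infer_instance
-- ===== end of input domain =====

-- B replaces A's one-pass dict get-and-increment tally by repeated partitioning of the
-- stripped word list: take the first remaining word, filter out all of its occurrences,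
-- record the drop in length as its count (alternative decomposition; not claimed faster).

-- shared strip step: "if item[-1] in ',.!?\'\"': item = item[:-1]" (identical code in both Pythons)
def pvStrip (item : String) : String :=
  match PySem.Str.pyGet? item (-1) with
  | some c => if ([',', '.', '!', '?', '\'', '"'].contains c) then PySem.Str.slice item none (some (-1)) else item
  | none => item  -- unreachable: split() never yields an empty token

-- ===== PORT A =====
def englishCounter (sr : String) : List (String × Int) :=
  let poemList := PySem.Str.split₀ sr
  let pDict : PySem.Dict String Int :=
    poemList.foldl (fun d item0 =>
      let item := pvStrip item0
      d.insert item (d.getD item 0 + 1)) PySem.Dict.empty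
  pDict.items

-- ===== PORT B =====
-- the while loop of Source B: state = (result dict, rest of the word list)
def pvTallyLoop (result : PySem.Dict String Int) (rest : List String) : PySem.Dict String Int :=
  match rest with
  | [] => result
  | first :: tl =>
    let smaller := tl.filter (fun x => x != first)
    pvTallyLoop (result.insert first (((first :: tl).length : Int) - (smaller.length : Int))) smaller
termination_by rest.length
decreasing_by simpa using Nat.lt_succ_of_le (List.length_filter_le _ _)

def englishCounter_alt (sr : String) : List (String × Int) :=
  let words := (PySem.Str.split₀ sr).map pvStrip
  (pvTallyLoop PySem.Dict.empty words).items

-- ===== PRECONDITION & SPEC =====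
def Spec_englishCounter (sr : String) (out : List (String × Int)) : Prop := out = englishCounter_alt sr
instance (sr : String) (out : List (String × Int)) : Decidable (Spec_englishCounter sr out) := by unfold Spec_englishCounter; infer_instance

-- ===== CLAIM (what is proved, stated in full; the proofs are below) =====
def Claim_equal_englishCounter : Prop := ∀ (sr : String), Dom_englishCounter sr → Spec_englishCounter sr (englishCounter sr)

-- ===== LEMMAS AND PROOFS =====

theorem pv_length_filter_ne_add_count (a : String) (l : List String) :
    (l.filter (fun x => x != a)).length + l.count a = l.length := by
  induction l with
  | nil => simp
  | cons b l ih =>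
    by_cases h : b = a
    · subst h; simp [← ih]; omega
    · simp [h, ← ih]; omega

theorem pv_ofList_filter (p : String → Bool) (l : List String) :
    PySem.Set.ofList (l.filter p) = (PySem.Set.ofList l).filter p := by
  induction l with
  | nil => simp [PySem.Set.ofList_nil]
  | cons a l ih =>
    by_cases h : p a
    · rw [List.filter_cons_of_pos h, PySem.Set.ofList_cons, PySem.Set.ofList_cons,
        List.filter_cons_of_pos h, ih]
      simp only [PySem.Set.discard]
      exact congrArg (a :: ·) (List.filter_comm _ _ _)
    · rw [List.filter_cons_of_neg (by simpa using h), PySem.Set.ofList_cons, ih,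
        List.filter_cons_of_neg (by simpa using h)]
      simp only [PySem.Set.discard, List.filter_filter]
      refine (List.filter_congr ?_).symm
      intro x _
      by_cases hx : x = a
      · subst hx; simp_all
      · simp [hx]

theorem pvTallyLoop_items (ws : List String) (d : PySem.Dict String Int)
    (hd : ∀ k ∈ ws, d.contains k = false) :
    (pvTallyLoop d ws).items
      = d.items ++ (PySem.Set.ofList ws).map (fun k => (k, (ws.count k : Int))) := by
  match ws with
  | [] => simp [pvTallyLoop, PySem.Set.ofList_nil]
  | first :: tl =>
    rw [pvTallyLoop]
    have hlen : (tl.filter (fun x => x != first)).length < (first :: tl).length :=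
      by simpa using Nat.lt_succ_of_le (List.length_filter_le _ _)
    have hd' : ∀ k ∈ tl.filter (fun x => x != first),
        (d.insert first (((first :: tl).length : Int) - ((tl.filter (fun x => x != first)).length : Int))).contains k = false := by
      intro k hk
      simp only [List.mem_filter, ne_eq, bne_iff_ne] at hk
      rw [PySem.Dict.contains_insert]
      simp [hk.2, hd k (List.mem_cons_of_mem _ hk.1)]
    rw [pvTallyLoop_items _ _ hd',
        PySem.Dict.items_insert_of_not_contains _ _ (hd first (List.mem_cons_self ..)),
        List.append_assoc]
    congr 1
    rw [PySem.Set.ofList_cons, List.map_cons, List.singleton_append]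
    congr 1
    · -- the recorded count of `first`
      have h1 := pv_length_filter_ne_add_count first tl
      have hc : (first :: tl).count first = tl.count first + 1 := by simp
      have hl : (first :: tl).length = tl.length + 1 := by simp
      congr 1
      omega
    · -- the remaining groups agree
      rw [pv_ofList_filter]
      simp only [PySem.Set.discard]
      have hpred : ∀ s : List String,
          s.filter (fun x => x != first) = s.filter (fun y => !(y == first)) := by
        intro s; rfl
      rw [← hpred]
      refine List.map_congr_left ?_
      intro x hx
      simp only [List.mem_filter, bne_iff_ne] at hx
      have hxne : x ≠ first := hx.2
      congr 1
      simp [hxne, List.count_filter, Ne.symm hxne]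
termination_by ws.length
decreasing_by simpa using Nat.lt_succ_of_le (List.length_filter_le _ _)

-- ===== VERDICT (by name: the statement is the Claim_ definition above) =====
theorem englishCounter_spec : Claim_equal_englishCounter := by
  intro sr _
  show englishCounter sr = englishCounter_alt sr
  have hA : englishCounter sr = (PySem.Dict.counter ((PySem.Str.split₀ sr).map pvStrip)).items := by
    simp only [englishCounter]
    rw [← PySem.Dict.foldl_insert_getD_add_one_eq_counter, List.foldl_map]
  rw [hA, PySem.Dict.items_counter]
  simp only [englishCounter_alt]
  rw [pvTallyLoop_items _ _ (by simp), PySem.Dict.empty]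
  simp
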